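-- pv_equiv track=rewrite | github.com/SegoPutswane/All-In-One | all_in_one.py | get_date_of_birth
-- ===== SOURCE A (Python) =====
-- def get_date_of_birth(id_number: str) -> str:
--     """
--     STEP 2: Extract the date of birth from the ID number and return it as a string
--     return format: DD/MM/YY:
--     """
--     #separating the date of birth from the ID number and converting it into a string
--     dob = str(id_number)[0:6]
--     #assign an empty string where the date of birth will be stored after generating
--     result = ""
--
--     #looping through the extracted date of birth to check where to place the forward slashes
--     for i in range(len(dob)):
--         result += dob[i]
--         if (i + 1) % 2== 0 and i < len(dob) - 1:
--             result += "/"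
--     return result
-- ===== SOURCE B (Python) =====
-- def get_date_of_birth(id_number: str) -> str:
--     dob = str(id_number)[0:6]
--     return "/".join(dob[i:i+2] for i in range(0, len(dob), 2))
-- ===== Notes on version B (the rewrite author's own statement) =====
-- stated objective: simpler
-- what changed: Replaced A's per-character accumulation with a modulo-2 separator guard by chunking the 6-char prefix into 2-char slices and joining them with a slash separator.
import Mathlib
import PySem

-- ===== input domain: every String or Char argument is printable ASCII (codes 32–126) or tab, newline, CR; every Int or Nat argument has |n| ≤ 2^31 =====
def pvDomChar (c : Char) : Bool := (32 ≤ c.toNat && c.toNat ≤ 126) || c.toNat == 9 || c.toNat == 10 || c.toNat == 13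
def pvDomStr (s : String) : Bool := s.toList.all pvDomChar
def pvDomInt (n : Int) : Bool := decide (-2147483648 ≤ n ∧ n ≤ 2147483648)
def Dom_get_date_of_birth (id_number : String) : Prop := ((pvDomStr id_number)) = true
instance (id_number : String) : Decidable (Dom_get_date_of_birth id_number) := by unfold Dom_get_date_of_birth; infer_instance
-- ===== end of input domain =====

-- B chunks the 6-char prefix into 2-char slices joined with a slash instead of A's
-- per-character accumulation with a modulo-2 separator guard (objective: simpler).

-- ===== PORT A =====
-- result is accumulated as a List Char and wrapped into a String at the end
def get_date_of_birth (id_number : String) : String :=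
  let dob := PySem.List.slice id_number.toList (some 0) (some 6)
  let result := (PySem.List.pyRange 0 (dob.length : Int) 1).foldl
    (fun (acc : List Char) (i : Int) =>
      let acc := acc ++ [PySem.List.pyGetD dob i ' ']
      if PySem.Int.mod (i + 1) 2 == 0 && decide (i < (dob.length : Int) - 1) then
        acc ++ ['/']
      else acc)
    []
  String.ofList result

-- ===== PORT B =====
def get_date_of_birth_alt (id_number : String) : String :=
  let dob := PySem.List.slice id_number.toList (some 0) (some 6)
  String.ofList (PySem.Chars.join ['/']
    ((PySem.List.pyRange 0 (dob.length : Int) 2).map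
      (fun i => PySem.List.slice dob (some i) (some (i + 2)))))

-- ===== PRECONDITION & SPEC =====
def Spec_get_date_of_birth (id_number : String) (out : String) : Prop := out = get_date_of_birth_alt id_number
instance (id_number : String) (out : String) : Decidable (Spec_get_date_of_birth id_number out) := by unfold Spec_get_date_of_birth; infer_instance

-- ===== CLAIM (what is proved, stated in full; the proofs are below) =====
def Claim_equal_get_date_of_birth : Prop := ∀ (id_number : String), Dom_get_date_of_birth id_number → Spec_get_date_of_birth id_number (get_date_of_birth id_number)

-- ===== LEMMAS AND PROOFS =====

-- Both ports depend on id_number only through dob, the ≤ 6-char prefix: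
-- the cores agree on every list of length ≤ 6 (case on its shape, then compute).
theorem gdob_core (dob : List Char) (h : dob.length ≤ 6) :
    (PySem.List.pyRange 0 (dob.length : Int) 1).foldl
      (fun (acc : List Char) (i : Int) =>
        let acc := acc ++ [PySem.List.pyGetD dob i ' ']
        if PySem.Int.mod (i + 1) 2 == 0 && decide (i < (dob.length : Int) - 1) then
          acc ++ ['/']
        else acc)
      []
    = PySem.Chars.join ['/']
        ((PySem.List.pyRange 0 (dob.length : Int) 2).map
          (fun i => PySem.List.slice dob (some i) (some (i + 2)))) := by
  rcases dob with _ | ⟨a, _ | ⟨b, _ | ⟨c, _ | ⟨d, _ | ⟨e, _ | ⟨f, _ | ⟨g, rest⟩⟩⟩⟩⟩⟩⟩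
  · decide
  · simp only [List.length_cons, List.length_nil]
    rw [show PySem.List.pyRange 0 ((1:Nat):Int) 1 = [0] from by decide,
        show PySem.List.pyRange 0 ((1:Nat):Int) 2 = [0] from by decide]
    simp [PySem.List.pyGetD, PySem.List.pyGet?, PySem.List.pyIdx?, PySem.List.slice,
          PySem.Int.mod, PySem.Chars.join, PySem.List.clampIdx, List.intercalate]
  · simp only [List.length_cons, List.length_nil]
    rw [show PySem.List.pyRange 0 ((2:Nat):Int) 1 = [0, 1] from by decide,
        show PySem.List.pyRange 0 ((2:Nat):Int) 2 = [0] from by decide]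
    simp [PySem.List.pyGetD, PySem.List.pyGet?, PySem.List.pyIdx?, PySem.List.slice,
          PySem.Int.mod, PySem.Chars.join, PySem.List.clampIdx, List.intercalate]
  · simp only [List.length_cons, List.length_nil]
    rw [show PySem.List.pyRange 0 ((3:Nat):Int) 1 = [0, 1, 2] from by decide,
        show PySem.List.pyRange 0 ((3:Nat):Int) 2 = [0, 2] from by decide]
    simp [PySem.List.pyGetD, PySem.List.pyGet?, PySem.List.pyIdx?, PySem.List.slice,
          PySem.Int.mod, PySem.Chars.join, PySem.List.clampIdx, List.intercalate]
  · simp only [List.length_cons, List.length_nil]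
    rw [show PySem.List.pyRange 0 ((4:Nat):Int) 1 = [0, 1, 2, 3] from by decide,
        show PySem.List.pyRange 0 ((4:Nat):Int) 2 = [0, 2] from by decide]
    simp [PySem.List.pyGetD, PySem.List.pyGet?, PySem.List.pyIdx?, PySem.List.slice,
          PySem.Int.mod, PySem.Chars.join, PySem.List.clampIdx, List.intercalate]
  · simp only [List.length_cons, List.length_nil]
    rw [show PySem.List.pyRange 0 ((5:Nat):Int) 1 = [0, 1, 2, 3, 4] from by decide,
        show PySem.List.pyRange 0 ((5:Nat):Int) 2 = [0, 2, 4] from by decide]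
    simp [PySem.List.pyGetD, PySem.List.pyGet?, PySem.List.pyIdx?, PySem.List.slice,
          PySem.Int.mod, PySem.Chars.join, PySem.List.clampIdx, List.intercalate]
  · simp only [List.length_cons, List.length_nil]
    rw [show PySem.List.pyRange 0 ((6:Nat):Int) 1 = [0, 1, 2, 3, 4, 5] from by decide,
        show PySem.List.pyRange 0 ((6:Nat):Int) 2 = [0, 2, 4] from by decide]
    simp [PySem.List.pyGetD, PySem.List.pyGet?, PySem.List.pyIdx?, PySem.List.slice,
          PySem.Int.mod, PySem.Chars.join, PySem.List.clampIdx, List.intercalate]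
  · simp at h; omega

theorem take6_len_le (cs : List Char) : (cs.take 6).length ≤ 6 := by
  simp

-- ===== VERDICT (by name: the statement is the Claim_ definition above) =====
theorem get_date_of_birth_spec : Claim_equal_get_date_of_birth := by
  intro s _
  unfold Spec_get_date_of_birth get_date_of_birth get_date_of_birth_alt
  simp only [PySem.List.slice_zero_start, PySem.List.slice_to (xs := s.toList) (b := 6) (by norm_num)]
  rw [show ((6:Int)).toNat = 6 from rfl]
  exact congrArg String.ofList (gdob_core (s.toList.take 6) (take6_len_le s.toList))
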